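-- pv_equiv track=rewrite | github.com/tokenpak/tokenpak | tokenpak/agent/proxy/router.py | get_model_tier
-- ===== SOURCE A (Python) =====
-- def get_model_tier(model: str) -> str:
--     """
--     Get the tier (pricing category) for a model.
--
--     Returns: "premium", "standard", "economy", or "unknown"
--     """
--     model_lower = model.lower()
--
--     if (
--         any(x in model_lower for x in ["opus", "gpt-4-turbo", "gpt-4"])
--         and "mini" not in model_lower
--     ):
--         return "premium"
--     elif (
--         any(x in model_lower for x in ["sonnet", "gpt-4o", "gemini-1.5-pro"])
--         and "mini" not in model_lower
--     ):
--         return "standard"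
--     elif any(x in model_lower for x in ["haiku", "mini", "gpt-3.5", "gemini-pro"]):
--         return "economy"
--
--     return "unknown"
-- ===== SOURCE B (Python) =====
-- _TIERS = ["premium", "standard", "economy", "unknown"]
-- _KEYWORD_RANK = {
--     "opus": 0, "gpt-4-turbo": 0, "gpt-4": 0,
--     "sonnet": 1, "gpt-4o": 1, "gemini-1.5-pro": 1,
--     "haiku": 2, "mini": 2, "gpt-3.5": 2, "gemini-pro": 2,
-- }
--
--
-- def get_model_tier(model: str) -> str:
--     ml = model.lower()
--     if "mini" in ml:
--         return "economy"
--     rank = min((r for k, r in _KEYWORD_RANK.items() if k in ml), default=3)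
--     return _TIERS[rank]
-- ===== Notes on version B (the rewrite author's own statement) =====
-- stated objective: alternative
-- what changed: Instead of an ordered if/elif cascade with per-branch exclusion tests, B short-circuits on 'mini' (which in A both blocks premium/standard and triggers economy) and otherwise aggregates: it scans one flat keyword->rank map, takes the minimum rank among all matched keywords, and indexes a tier table by that rank.
import Mathlib
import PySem

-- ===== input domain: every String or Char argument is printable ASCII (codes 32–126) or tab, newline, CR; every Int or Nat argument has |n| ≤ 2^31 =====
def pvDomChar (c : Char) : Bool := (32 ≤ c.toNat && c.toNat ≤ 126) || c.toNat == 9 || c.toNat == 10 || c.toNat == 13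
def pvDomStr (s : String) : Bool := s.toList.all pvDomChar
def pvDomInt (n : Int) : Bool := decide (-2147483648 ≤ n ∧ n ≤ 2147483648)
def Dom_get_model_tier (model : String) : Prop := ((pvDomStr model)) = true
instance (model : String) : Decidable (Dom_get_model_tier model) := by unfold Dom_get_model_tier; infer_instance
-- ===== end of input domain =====

-- B replaces A's if/elif cascade with a 'mini' short-circuit plus a min-rank aggregation
-- over one flat keyword->rank table, indexing a tier list by the minimum matched rank (alternative; same behaviour).

-- ===== PORT A =====
def get_model_tier (model : String) : String :=
  let model_lower := PySem.Str.lower model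
  if (["opus", "gpt-4-turbo", "gpt-4"].any (fun x => PySem.Str.isIn x model_lower))
      && !(PySem.Str.isIn "mini" model_lower) then "premium"
  else if (["sonnet", "gpt-4o", "gemini-1.5-pro"].any (fun x => PySem.Str.isIn x model_lower))
      && !(PySem.Str.isIn "mini" model_lower) then "standard"
  else if ["haiku", "mini", "gpt-3.5", "gemini-pro"].any (fun x => PySem.Str.isIn x model_lower) then "economy"
  else "unknown"

-- ===== PORT B =====
def pvTiers : List String := ["premium", "standard", "economy", "unknown"]

def pvKeywordRank : List (String × Nat) :=
  [("opus", 0), ("gpt-4-turbo", 0), ("gpt-4", 0),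
   ("sonnet", 1), ("gpt-4o", 1), ("gemini-1.5-pro", 1),
   ("haiku", 2), ("mini", 2), ("gpt-3.5", 2), ("gemini-pro", 2)]

def get_model_tier_alt (model : String) : String :=
  let ml := PySem.Str.lower model
  if PySem.Str.isIn "mini" ml then "economy"
  else
    -- min(gen, default=3) over matched ranks, ported as a running-minimum fold seeded with the
    -- default (exact here: every rank in the table is < 3)
    let rank := pvKeywordRank.foldl
      (fun acc kr => if PySem.Str.isIn kr.1 ml then Nat.min acc kr.2 else acc) 3
    pvTiers.getD rank ""

-- ===== PRECONDITION & SPEC =====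
def Spec_get_model_tier (model : String) (out : String) : Prop := out = get_model_tier_alt model
instance (model : String) (out : String) : Decidable (Spec_get_model_tier model out) := by unfold Spec_get_model_tier; infer_instance

-- ===== CLAIM =====
def Claim_equal_get_model_tier : Prop := ∀ (model : String), Dom_get_model_tier model → Spec_get_model_tier model (get_model_tier model)

-- ===== LEMMAS AND PROOFS =====

-- ===== VERDICT =====
theorem get_model_tier_spec : Claim_equal_get_model_tier := by
  intro model _
  unfold Spec_get_model_tier get_model_tier get_model_tier_alt pvKeywordRank pvTiers
  simp only [List.any_cons, List.any_nil, List.foldl_cons, List.foldl_nil, Bool.or_false]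
  generalize PySem.Str.isIn "mini" (PySem.Str.lower model) = mini
  generalize PySem.Str.isIn "opus" (PySem.Str.lower model) = opus
  generalize PySem.Str.isIn "gpt-4-turbo" (PySem.Str.lower model) = g4t
  generalize PySem.Str.isIn "gpt-4" (PySem.Str.lower model) = g4
  generalize PySem.Str.isIn "sonnet" (PySem.Str.lower model) = son
  generalize PySem.Str.isIn "gpt-4o" (PySem.Str.lower model) = g4o
  generalize PySem.Str.isIn "gemini-1.5-pro" (PySem.Str.lower model) = gem
  generalize PySem.Str.isIn "haiku" (PySem.Str.lower model) = hai
  generalize PySem.Str.isIn "gpt-3.5" (PySem.Str.lower model) = g35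
  generalize PySem.Str.isIn "gemini-pro" (PySem.Str.lower model) = gpro
  revert mini opus g4t g4 son g4o gem hai g35 gpro
  decide
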